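-- pv_equiv track=rewrite | github.com/NousResearch/hermes-agent | tools/shell_quote.py | _win_cmd_quote
-- ===== SOURCE A (Python) =====
-- def _win_cmd_quote(s: str) -> str:
--     """Quote a string for safe use in cmd.exe.
--
--     cmd.exe metacharacters: & | < > ^ " % !
--     Strategy: wrap in double quotes, escape internal double quotes with
--     backslash, and escape % with %% (environment variable expansion).
--     """
--     if not s:
--         return '""'
--     # If the string has no special chars, return as-is
--     _CMD_META = set('&|<>^"% !\t')
--     if not any(c in _CMD_META for c in s):
--         return s
--     # Escape internal double quotes and percent signs
--     escaped = s.replace('"', '\\"').replace("%", "%%")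
--     return f'"{escaped}"'
-- ===== SOURCE B (Python) =====
-- _CMD_META = '&|<>^"% !\t'
--
-- def _win_cmd_quote(s: str) -> str:
--     """Single pass: build escaped buffer and special flag together."""
--     if not s:
--         return '""'
--     buf = []
--     has_special = False
--     for c in s:
--         if c in _CMD_META:
--             has_special = True
--         if c == '"':
--             buf.append('\\"')
--         elif c == '%':
--             buf.append('%%')
--         else:
--             buf.append(c)
--     if not has_special:
--         return s
--     return '"' + ''.join(buf) + '"'
-- ===== Notes on version B (the rewrite author's own statement) =====
-- stated objective: alternative
-- what changed: Replaced the any() scan plus two chained str.replace passes with one traversal that builds the escaped buffer and the has-special flag simultaneously.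
import Mathlib
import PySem

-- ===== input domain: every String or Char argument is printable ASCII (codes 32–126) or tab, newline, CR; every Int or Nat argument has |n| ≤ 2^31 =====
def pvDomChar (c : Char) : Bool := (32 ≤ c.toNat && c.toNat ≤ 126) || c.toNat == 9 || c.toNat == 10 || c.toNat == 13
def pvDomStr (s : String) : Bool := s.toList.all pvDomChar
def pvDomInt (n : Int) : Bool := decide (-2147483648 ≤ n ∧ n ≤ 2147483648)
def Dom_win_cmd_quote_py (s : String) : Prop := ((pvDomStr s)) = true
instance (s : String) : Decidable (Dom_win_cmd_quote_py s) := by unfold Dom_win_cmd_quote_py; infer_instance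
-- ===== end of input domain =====

-- B changes the decomposition only (one traversal building buffer + flag, instead of any() plus two replace passes); same O(n) cost.

-- ===== PORT A =====
def win_cmd_quote_py (s : String) : String :=
  if s = "" then "\"\""
  else
    let cmdMeta : PySem.Set Char := PySem.Set.ofList "&|<>^\"% !\t".toList
    if !(s.toList.any (fun c => PySem.Set.contains cmdMeta c)) then s
    else
      let escaped := PySem.Str.replace (PySem.Str.replace s "\"" "\\\"") "%" "%%"
      "\"" ++ escaped ++ "\""

-- ===== PORT B =====
def win_cmd_quote_py_alt (s : String) : String :=
  if s = "" then "\"\""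
  else
    let st := s.toList.foldl (fun (p : List Char × Bool) c =>
      (p.1 ++ (if c = '"' then ['\\', '"'] else if c = '%' then ['%', '%'] else [c]),
       p.2 || decide (c ∈ "&|<>^\"% !\t".toList))) ([], false)
    if st.2 = false then s
    else "\"" ++ String.ofList st.1 ++ "\""

-- ===== PRECONDITION & SPEC =====
def Spec_win_cmd_quote_py (s : String) (out : String) : Prop := out = win_cmd_quote_py_alt s
instance (s : String) (out : String) : Decidable (Spec_win_cmd_quote_py s out) := by unfold Spec_win_cmd_quote_py; infer_instance

-- ===== CLAIM (what is proved, stated in full; the proofs are below) =====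
def Claim_equal_win_cmd_quote_py : Prop := ∀ (s : String), Dom_win_cmd_quote_py s → Spec_win_cmd_quote_py s (win_cmd_quote_py s)

-- ===== LEMMAS AND PROOFS =====

def pvEsc (c : Char) : List Char :=
  if c = '"' then ['\\', '"'] else if c = '%' then ['%', '%'] else [c]

def pvMetaP (c : Char) : Bool := decide (c ∈ "&|<>^\"% !\t".toList)

-- B's fold computes (acc ++ flatMap pvEsc l, b || l.any pvMetaP)
theorem pvFoldB (l : List Char) (acc : List Char) (b : Bool) :
    l.foldl (fun (p : List Char × Bool) c =>
      (p.1 ++ (if c = '"' then ['\\', '"'] else if c = '%' then ['%', '%'] else [c]),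
       p.2 || decide (c ∈ "&|<>^\"% !\t".toList))) (acc, b)
    = (acc ++ l.flatMap pvEsc, b || l.any pvMetaP) := by
  induction l generalizing acc b with
  | nil => simp
  | cons c t ih =>
      simp only [List.foldl_cons, List.flatMap_cons, List.any_cons, ih, pvEsc, pvMetaP]
      simp [List.append_assoc, Bool.or_assoc]

-- single-char replace is a flatMap
theorem pvReplaceGo (o : Char) (new : List Char) (l acc : List Char) (fuel : Nat)
    (h : l.length ≤ fuel) :
    PySem.Chars.replace.go [o] new fuel l acc
    = acc.reverse ++ l.flatMap (fun c => if c = o then new else [c]) := by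
  induction l generalizing fuel acc with
  | nil => cases fuel <;> simp [PySem.Chars.replace.go]
  | cons c t ih =>
      cases fuel with
      | zero => simp at h
      | succ f =>
          simp only [PySem.Chars.replace.go]
          by_cases hc : c = o
          · subst hc
            have hp : List.isPrefixOf [c] (c :: t) = true := by
              simp [List.isPrefixOf]
            simp only [hp, if_pos, List.length_cons, List.length_nil,
              List.drop_succ_cons, List.drop_zero]
            rw [ih _ f (by simpa using h)]
            simp
          · have hp : List.isPrefixOf [o] (c :: t) = false := by
              simp [List.isPrefixOf]
              exact fun hh => absurd hh.symm hc
            simp only [hp]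
            rw [if_neg (by simp), ih _ f (by simpa using h)]
            simp [hc]

theorem pvReplaceSingle (o : Char) (new : List Char) (l : List Char) :
    PySem.Chars.replace l [o] new = l.flatMap (fun c => if c = o then new else [c]) := by
  have hne : ([o] : List Char).isEmpty = false := rfl
  rw [PySem.Chars.replace, hne]
  simp only [Bool.false_eq_true, if_false]
  exact pvReplaceGo o new l [] l.length le_rfl

theorem pvEscComp (l : List Char) :
    (l.flatMap (fun c => if c = '"' then ['\\', '"'] else [c])).flatMap
      (fun c => if c = '%' then ['%', '%'] else [c]) = l.flatMap pvEsc := by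
  induction l with
  | nil => rfl
  | cons c t ih =>
      simp only [List.flatMap_cons, List.flatMap_append, ih, pvEsc]
      by_cases h1 : c = '"'
      · subst h1; simp
      · by_cases h2 : c = '%'
        · subst h2; simp
        · simp [h1, h2]

theorem pvAnyEq (l : List Char) :
    (l.any (fun c => PySem.Set.contains (PySem.Set.ofList "&|<>^\"% !\t".toList) c))
    = l.any pvMetaP := by
  apply PySem.List.any_congr_mem
  intro c _
  simp only [pvMetaP]
  by_cases h : c ∈ "&|<>^\"% !\t".toList
  · simp
  · simp only [h, decide_false]
    by_contra hc
    simp only [Bool.not_eq_false] at hc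
    exact h ((PySem.Set.mem_ofList _ _).mp ((PySem.Set.contains_iff _ _).mp hc))

theorem pvStringEq (a b : String) (h : a.toList = b.toList) : a = b :=
  String.toList_inj.mp h

-- ===== VERDICT (by name: the statement is the Claim_ definition above) =====
theorem win_cmd_quote_py_spec : Claim_equal_win_cmd_quote_py := by
  intro s _
  unfold Spec_win_cmd_quote_py win_cmd_quote_py win_cmd_quote_py_alt
  by_cases hs : s = ""
  · simp [hs]
  · simp only [if_neg hs]
    rw [pvFoldB s.toList [] false]
    simp only [List.nil_append, Bool.false_or]
    rw [pvAnyEq]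
    by_cases hany : s.toList.any pvMetaP
    · simp only [hany, Bool.not_true, Bool.false_eq_true, Bool.true_eq_false, if_false]
      apply pvStringEq
      simp only [String.toList_append, PySem.Str.toList_replace, String.toList_ofList]
      rw [show ("\"" : String).toList = ['"'] from rfl,
        show ("\\\"" : String).toList = ['\\', '"'] from rfl,
        show ("%" : String).toList = ['%'] from rfl,
        show ("%%" : String).toList = ['%', '%'] from rfl,
        pvReplaceSingle, pvReplaceSingle, pvEscComp]
    · simp [hany]
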